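-- pv_equiv track=rewrite | github.com/ArseniyFokin/Functional-element-network | calculator.py | generate_bit_set
-- ===== SOURCE A (Python) =====
-- def generate_bit_set(mask):
--     """генератор всех наборов битов в порядке возрастания по битовой маске
--
--     :param mask: битовая маска, состоящая из 1, 0 и ?. ? означает, что в данном месте могут быть и 0 и 1
--     """
--     size_mask = 0
--     for i in mask:
--         if i == '?':
--             size_mask = size_mask + 1
--
--     for i in range(2**size_mask):
--         ans = ''
--         cur_bit_set = bin(i)[2:]
--         cur_bit_set = '0' * (size_mask - len(cur_bit_set)) + cur_bit_set
--         cur = 0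
--         for j in mask:
--             if j == '?':
--                 ans = ans + cur_bit_set[cur]
--                 cur = cur + 1
--             else:
--                 ans = ans + j
--         yield ans
-- ===== SOURCE B (Python) =====
-- def generate_bit_set(mask):
--     """Same generator, but enumerates the '?'-positions once and substitutes
--     recursively generated bit combinations, instead of counting integers and
--     formatting them with bin()/zero-padding."""
--     positions = [i for i, c in enumerate(mask) if c == '?']
--
--     def combos(k):
--         if k == 0:
--             yield []
--             return
--         for b in '01':
--             for rest in combos(k - 1):
--                 yield [b] + rest
--
--     for combo in combos(len(positions)):
--         chars = list(mask)
--         for p, b in zip(positions, combo):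
--             chars[p] = b
--         yield ''.join(chars)
-- ===== Notes on version B (the rewrite author's own statement) =====
-- stated objective: alternative
-- what changed: B lists the '?'-positions once and substitutes recursively generated bit combinations into a copy of the mask, instead of counting integers 0..2^k-1 and re-scanning the mask while formatting each counter with bin() and manual zero-padding.
import Mathlib
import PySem

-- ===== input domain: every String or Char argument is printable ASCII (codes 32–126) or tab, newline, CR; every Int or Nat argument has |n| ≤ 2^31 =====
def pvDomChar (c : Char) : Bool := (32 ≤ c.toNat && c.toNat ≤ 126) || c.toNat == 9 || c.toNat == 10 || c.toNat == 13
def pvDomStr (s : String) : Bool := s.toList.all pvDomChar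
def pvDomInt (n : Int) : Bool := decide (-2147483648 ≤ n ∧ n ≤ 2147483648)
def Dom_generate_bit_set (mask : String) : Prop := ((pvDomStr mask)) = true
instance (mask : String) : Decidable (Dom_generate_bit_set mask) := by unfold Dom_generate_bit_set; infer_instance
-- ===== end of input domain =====

-- B enumerates the '?'-positions and substitutes recursively generated bit combinations
-- instead of counting integers and formatting them with bin()/zero-padding (alternative decomposition).
-- Both versions are generators consumed as the list of yielded strings.

-- ===== PORT A =====
-- bin(n)[2:] for n ≥ 1: most-significant-bit-first binary digits (builtin bin, ported by hand; exact for n ≥ 1)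
def binAux : Nat → List Char
  | 0 => []
  | (n+1) => binAux ((n+1)/2) ++ [if (n+1) % 2 = 1 then '1' else '0']
decreasing_by exact Nat.div_lt_self (Nat.succ_pos n) one_lt_two

-- bin(n)[2:] for n ≥ 0 (bin(0)[2:] = "0")
def binChars (n : Nat) : List Char := if n = 0 then ['0'] else binAux n

def generate_bit_set (mask : String) : List String :=
  let size_mask : Int := mask.toList.foldl (fun acc i => if i = '?' then acc + 1 else acc) 0
  -- 2**size_mask: size_mask ≥ 0, so the Nat exponent is exact; i ∈ range(2**size_mask) has i ≥ 0
  (PySem.List.pyRange 0 (2 ^ size_mask.toNat) 1).map (fun i =>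
    let bs := binChars i.toNat
    -- '0' * (size_mask - len(bs)) + bs : Int.toNat clamps a negative repeat count to 0, as Python does
    let cur_bit_set := List.replicate (size_mask - (bs.length : Int)).toNat '0' ++ bs
    let r := mask.toList.foldl (fun (st : List Char × Int) j =>
        if j = '?' then (st.1 ++ [PySem.List.pyGetD cur_bit_set st.2 ' '], st.2 + 1)
        else (st.1 ++ [j], st.2)) (([] : List Char), (0 : Int))
    String.mk r.1)

-- ===== PORT B =====
-- combos(k): the recursively generated list of k-length '0'/'1' combinations, first bit outermost
def combos : Nat → List (List Char)
  | 0 => [[]]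
  | (k+1) => ['0', '1'].flatMap (fun b => (combos k).map (fun rest => b :: rest))

def generate_bit_set_alt (mask : String) : List String :=
  let positions := ((PySem.List.enumerate mask.toList).filter (fun p => p.2 == '?')).map (fun p => p.1)
  (combos positions.length).map (fun combo =>
    String.mk ((positions.zip combo).foldl (fun cs pb => PySem.List.pySetD cs pb.1 pb.2) mask.toList))

-- ===== PRECONDITION & SPEC =====
def Spec_generate_bit_set (mask : String) (out : List String) : Prop := out = generate_bit_set_alt mask
instance (mask : String) (out : List String) : Decidable (Spec_generate_bit_set mask out) := by unfold Spec_generate_bit_set; infer_instance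

-- ===== CLAIM (what is proved, stated in full; the proofs are below) =====
def Claim_equal_generate_bit_set : Prop := ∀ (mask : String), Dom_generate_bit_set mask → Spec_generate_bit_set mask (generate_bit_set mask)

-- ===== LEMMAS AND PROOFS =====

-- the common mathematical core: substitute the bits s at the '?'-positions of m
def subst : List Char → List Char → List Char
  | [], _ => []
  | c :: m, s => if c = '?' then s.headD ' ' :: subst m s.tail else c :: subst m s

-- width-w binary of i, least significant bit first
def bitsLE : Nat → Nat → List Char
  | 0, _ => []
  | (w+1), i => (if i % 2 = 1 then '1' else '0') :: bitsLE w (i / 2)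

-- the '?'-positions of m, as Nats
def posNat : List Char → List Nat
  | [] => []
  | c :: m => (if c = '?' then [0] else []) ++ (posNat m).map (· + 1)


-- A's counting loop is the '?'-count
theorem count_fold (m : List Char) (z : Int) :
    m.foldl (fun acc i => if i = '?' then acc + 1 else acc) z = z + m.count '?' := by
  induction m generalizing z with
  | nil => simp
  | cons c m ih =>
    by_cases h : c = '?' <;> simp [h, ih, List.count_cons] <;> push_cast <;> ring

-- A's inner loop over the mask is `subst`
theorem foldA (s m acc : List Char) : ∀ cur : Int, 0 ≤ cur →
    (m.foldl (fun (st : List Char × Int) j =>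
        if j = '?' then (st.1 ++ [PySem.List.pyGetD s st.2 ' '], st.2 + 1)
        else (st.1 ++ [j], st.2)) (acc, cur)).1 = acc ++ subst m (s.drop cur.toNat) := by
  induction m generalizing acc with
  | nil => intro cur _; simp [subst]
  | cons c m ih =>
    intro cur hcur
    have hget : PySem.List.pyGetD s cur ' ' = (s.drop cur.toNat).headD ' ' := by
      rw [PySem.List.pyGetD_of_nonneg s ' ' hcur]
      simp [List.getD_eq_getElem?_getD, List.headD_eq_head?, List.head?_drop]
    have htn : (cur + 1).toNat = cur.toNat + 1 := by omega
    by_cases h : c = '?'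
    · subst h
      rw [List.foldl_cons, if_pos rfl, ih _ (cur + 1) (by omega), htn]
      rw [show subst ('?' :: m) (s.drop cur.toNat)
            = (s.drop cur.toNat).headD ' ' :: subst m (s.drop cur.toNat).tail from by simp [subst]]
      rw [List.tail_drop, hget]
      simp
    · rw [List.foldl_cons, if_neg h, ih _ cur hcur]
      rw [show subst (c :: m) (s.drop cur.toNat) = c :: subst m (s.drop cur.toNat) from by
        simp [subst, h]]
      simp

-- with no '?' in m the bits are ignored
theorem subst_no_q (m : List Char) (s : List Char) (h : m.count '?' = 0) : subst m s = m := by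
  induction m generalizing s with
  | nil => simp [subst]
  | cons c m ih =>
    have hc : ¬ c = '?' := by
      intro hc; simp [List.count_cons, hc] at h
    have hm : m.count '?' = 0 := by simp [List.count_cons, hc] at h ⊢; omega
    simp [subst, hc, ih _ hm]

theorem bitsLE_zero (k : Nat) : bitsLE k 0 = List.replicate k '0' := by
  induction k with
  | zero => simp [bitsLE]
  | succ k ih => simp [bitsLE, ih, List.replicate_succ]

theorem bitsLE_split0 (k : Nat) : ∀ i, i < 2 ^ k → bitsLE (k + 1) i = bitsLE k i ++ ['0'] := by
  induction k with
  | zero =>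
    intro i hi
    have : i = 0 := by omega
    subst this; simp [bitsLE]
  | succ k ih =>
    intro i hi
    have e : 2 ^ (k + 1) = 2 * 2 ^ k := by ring
    have h2 : i / 2 < 2 ^ k := by omega
    have r : bitsLE (k + 1 + 1) i
        = (if i % 2 = 1 then '1' else '0') :: bitsLE (k + 1) (i / 2) := rfl
    have r2 : bitsLE (k + 1) i
        = (if i % 2 = 1 then '1' else '0') :: bitsLE k (i / 2) := rfl
    rw [r, r2, ih (i / 2) h2, List.cons_append]

theorem bitsLE_split1 (k : Nat) : ∀ i, i < 2 ^ k → bitsLE (k + 1) (2 ^ k + i) = bitsLE k i ++ ['1'] := by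
  induction k with
  | zero =>
    intro i hi
    have : i = 0 := by omega
    subst this; simp [bitsLE]
  | succ k ih =>
    intro i hi
    have e : 2 ^ (k + 1) = 2 * 2 ^ k := by ring
    have hm : (2 ^ (k + 1) + i) % 2 = i % 2 := by omega
    have hd : (2 ^ (k + 1) + i) / 2 = 2 ^ k + i / 2 := by omega
    have l : bitsLE (k + 1 + 1) (2 ^ (k + 1) + i)
        = (if (2 ^ (k + 1) + i) % 2 = 1 then '1' else '0')
            :: bitsLE (k + 1) ((2 ^ (k + 1) + i) / 2) := rfl
    have r : bitsLE (k + 1) i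
        = (if i % 2 = 1 then '1' else '0') :: bitsLE k (i / 2) := rfl
    rw [l, hm, hd, ih (i / 2) (by omega), r, List.cons_append]

-- A's zero-padded bin(i) is the width-(k+1) binary of i, MSB first
theorem pad_eq (k : Nat) : ∀ i, i < 2 ^ (k + 1) →
    List.replicate ((k + 1) - (binChars i).length) '0' ++ binChars i = (bitsLE (k + 1) i).reverse := by
  induction k with
  | zero =>
    intro i hi
    have : i = 0 ∨ i = 1 := by omega
    rcases this with rfl | rfl <;> simp [binChars, binAux, bitsLE, List.replicate]
  | succ k ih =>
    intro i hi
    rcases Nat.lt_or_ge i 2 with h2 | h2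
    · have : i = 0 ∨ i = 1 := by omega
      rcases this with rfl | rfl
      · rw [bitsLE_zero]
        simp [binChars, List.reverse_replicate, ← List.replicate_succ']
      · have hb : binChars 1 = ['1'] := by simp [binChars, binAux]
        rw [hb]
        show List.replicate (k + 1) '0' ++ ['1'] = (bitsLE (k + 2) 1).reverse
        simp [bitsLE, bitsLE_zero, List.reverse_replicate, List.replicate_succ',
          List.append_assoc]
    · obtain ⟨t, rfl⟩ : ∃ t, i = t + 1 := ⟨i - 1, by omega⟩
      have e : 2 ^ (k + 1) = 2 * 2 ^ k := by ring
      have hj : (t + 1) / 2 ≠ 0 := by omega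
      have hstep : binChars (t + 1) = binAux ((t + 1) / 2) ++ [if (t + 1) % 2 = 1 then '1' else '0'] := by
        simp [binChars, binAux]
      have hbc : binChars ((t + 1) / 2) = binAux ((t + 1) / 2) := by simp [binChars, hj]
      have hlen : (k + 2) - (binAux ((t + 1) / 2)).length.succ
          = (k + 1) - (binChars ((t + 1) / 2)).length := by rw [hbc]; omega
      have hrec := ih ((t + 1) / 2) (by omega)
      calc List.replicate ((k + 2) - (binChars (t + 1)).length) '0' ++ binChars (t + 1)
          = (List.replicate ((k + 1) - (binChars ((t + 1) / 2)).length) '0'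
              ++ binChars ((t + 1) / 2)) ++ [if (t + 1) % 2 = 1 then '1' else '0'] := by
            rw [hstep, hbc]
            simp only [List.length_append, List.length_cons, List.length_nil, List.append_assoc]
            congr 2
            omega
        _ = (bitsLE (k + 1) ((t + 1) / 2)).reverse ++ [if (t + 1) % 2 = 1 then '1' else '0'] := by
            rw [hrec]
        _ = (bitsLE (k + 2) (t + 1)).reverse := by
            show _ = ((if (t + 1) % 2 = 1 then '1' else '0') :: bitsLE (k + 1) ((t + 1) / 2)).reverse
            simp

-- the counter order of A equals the combination order of B
theorem map_bits (k : Nat) :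
    (List.range (2 ^ k)).map (fun i => (bitsLE k i).reverse) = combos k := by
  induction k with
  | zero => simp [bitsLE, combos]
  | succ k ih =>
    have e : 2 ^ (k + 1) = 2 ^ k + 2 ^ k := by ring
    rw [e, List.range_add, List.map_append, List.map_map]
    have h0 : (List.range (2 ^ k)).map (fun i => (bitsLE (k + 1) i).reverse)
        = ((List.range (2 ^ k)).map (fun i => (bitsLE k i).reverse)).map (fun r => '0' :: r) := by
      rw [List.map_map]
      refine List.map_congr_left ?_
      intro i hi
      have : i < 2 ^ k := List.mem_range.mp hi
      simp [bitsLE_split0 k i this]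
    have h1 : (List.range (2 ^ k)).map ((fun i => (bitsLE (k + 1) i).reverse) ∘ (fun j => 2 ^ k + j))
        = ((List.range (2 ^ k)).map (fun i => (bitsLE k i).reverse)).map (fun r => '1' :: r) := by
      rw [List.map_map]
      refine List.map_congr_left ?_
      intro i hi
      have : i < 2 ^ k := List.mem_range.mp hi
      simp [Function.comp, bitsLE_split1 k i this]
    rw [h0, h1, ih]
    simp [combos]

theorem combos_length (k : Nat) : ∀ s ∈ combos k, s.length = k := by
  induction k with
  | zero => intro s hs; simp [combos] at hs; simp [hs]
  | succ k ih =>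
    intro s hs
    simp only [combos, List.mem_flatMap, List.mem_map] at hs
    obtain ⟨b, _, rest, hrest, rfl⟩ := hs
    simp [ih rest hrest]

theorem shift (pairs : List (Nat × Char)) (c : Char) (cs : List Char) :
    (pairs.map (Prod.map (· + 1) id)).foldl (fun cs pb => cs.set pb.1 pb.2) (c :: cs)
      = c :: pairs.foldl (fun cs pb => cs.set pb.1 pb.2) cs := by
  induction pairs generalizing cs with
  | nil => simp
  | cons p pairs ih => simp [Prod.map, ih]

-- B's position/zip substitution is `subst`
theorem foldNat (m : List Char) : ∀ s : List Char, m.count '?' ≤ s.length →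
    ((posNat m).zip s).foldl (fun cs pb => cs.set pb.1 pb.2) m = subst m s := by
  induction m with
  | nil => intro s h; simp [posNat, subst]
  | cons c m ih =>
    intro s h
    by_cases hc : c = '?'
    · subst hc
      have hcount : m.count '?' + 1 ≤ s.length := by
        simpa [List.count_cons] using h
      cases s with
      | nil => simp at hcount
      | cons b s' =>
        have e1 : posNat ('?' :: m) = 0 :: (posNat m).map (· + 1) := by simp [posNat]
        rw [e1, List.zip_cons_cons, List.foldl_cons]
        rw [show ('?' :: m).set 0 b = b :: m from rfl]
        rw [List.zip_map_left, shift]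
        rw [ih s' (by simp at hcount; omega)]
        simp [subst]
    · have e1 : posNat (c :: m) = (posNat m).map (· + 1) := by simp [posNat, hc]
      rw [e1, List.zip_map_left, shift]
      rw [ih s (by simpa [List.count_cons, hc] using h)]
      simp [subst, hc]

theorem posNat_length (m : List Char) : (posNat m).length = m.count '?' := by
  induction m with
  | nil => simp [posNat]
  | cons c m ih => by_cases hc : c = '?' <;> simp [posNat, hc, ih, List.count_cons]

-- B's enumerate/filter position list, bridged to Nat positions
theorem pos_bridge (m : List Char) : ∀ t : Int,
    ((PySem.List.enumerate m t).filter (fun p => p.2 == '?')).map (fun p => p.1)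
      = (posNat m).map (fun p : Nat => t + (p : Int)) := by
  induction m with
  | nil => intro t; simp [PySem.List.enumerate_nil, posNat]
  | cons c m ih =>
    intro t
    rw [PySem.List.enumerate_cons]
    by_cases hc : c = '?'
    · subst hc
      have e1 : posNat ('?' :: m) = 0 :: (posNat m).map (· + 1) := by simp [posNat]
      rw [e1, List.filter_cons_of_pos (by simp), List.map_cons, List.map_cons, ih (t + 1), List.map_map]
      congr 1
      · simp
      · refine List.map_congr_left ?_
        intro p _
        simp only [Function.comp_apply]
        push_cast
        ring
    · have e1 : posNat (c :: m) = (posNat m).map (· + 1) := by simp [posNat, hc]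
      rw [e1, List.filter_cons_of_neg (by simp [hc]), ih (t + 1), List.map_map]
      refine List.map_congr_left ?_
      intro p _
      simp only [Function.comp_apply]
      push_cast
      ring

theorem hA (mask : String) :
    generate_bit_set mask = (List.range (2 ^ (mask.toList.count '?'))).map (fun j =>
      String.mk (subst mask.toList
        (List.replicate ((mask.toList.count '?') - (binChars j).length) '0' ++ binChars j))) := by
  unfold generate_bit_set
  simp only [count_fold, zero_add, Int.toNat_natCast]
  have hpow : ((2 : Int) ^ (mask.toList.count '?')) = ((2 ^ (mask.toList.count '?') : Nat) : Int) := by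
    push_cast; ring
  rw [hpow, PySem.List.pyRange_one, List.map_map]
  simp only [sub_zero, Int.toNat_natCast]
  refine List.map_congr_left ?_
  intro j hj
  simp only [Function.comp_apply, zero_add, Int.toNat_natCast]
  rw [foldA _ _ _ 0 le_rfl]
  have hsub : (((mask.toList.count '?' : Nat) : Int) - ((binChars j).length : Int)).toNat
      = mask.toList.count '?' - (binChars j).length := by omega
  simp [hsub]

theorem hB (mask : String) :
    generate_bit_set_alt mask = (combos (mask.toList.count '?')).map (fun combo =>
      String.mk (subst mask.toList combo)) := by
  unfold generate_bit_set_alt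
  have hp : ((PySem.List.enumerate mask.toList 0).filter (fun p => p.2 == '?')).map (fun p => p.1)
      = (posNat mask.toList).map (fun p : Nat => (p : Int)) := by
    rw [pos_bridge mask.toList 0]
    refine List.map_congr_left ?_
    intro p _
    simp
  rw [hp]
  simp only [List.length_map, posNat_length]
  refine List.map_congr_left ?_
  intro combo hcombo
  rw [List.zip_map_left, List.foldl_map]
  simp only [Prod.map_fst, Prod.map_snd, id_eq, PySem.List.pySetD_natCast]
  rw [foldNat mask.toList combo (by rw [combos_length _ combo hcombo])]

theorem main_core (m : List Char) (k : Nat) (hk : m.count '?' = k) :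
    (List.range (2 ^ k)).map (fun j =>
        String.mk (subst m (List.replicate (k - (binChars j).length) '0' ++ binChars j)))
      = (combos k).map (fun combo => String.mk (subst m combo)) := by
  cases k with
  | zero =>
    simp only [pow_zero, List.range_one, List.map_cons, List.map_nil, combos]
    rw [subst_no_q m _ hk, subst_no_q m _ hk]
  | succ n =>
    have h1 : ∀ j ∈ List.range (2 ^ (n + 1)),
        String.mk (subst m (List.replicate ((n + 1) - (binChars j).length) '0' ++ binChars j))
          = String.mk (subst m ((bitsLE (n + 1) j).reverse)) := by
      intro j hj
      rw [pad_eq n j (List.mem_range.mp hj)]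
    rw [List.map_congr_left h1, ← map_bits (n + 1), List.map_map]
    rfl

theorem gen_eq (mask : String) : generate_bit_set mask = generate_bit_set_alt mask := by
  rw [hA, hB, main_core mask.toList (mask.toList.count '?') rfl]

theorem generate_bit_set_spec : Claim_equal_generate_bit_set := by
  intro mask _
  unfold Spec_generate_bit_set
  exact gen_eq mask
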